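-- pv_equiv track=rewrite | github.com/amikami102/AdventOfCode | year2024/day05/main.py | is_incorrect_order
-- ===== SOURCE A (Python) =====
-- from itertools import combinations
--
-- def is_incorrect_order(
--         update: tuple[int, ...],
--         rules: list[tuple[int, int]]
--     ) -> bool:
--     """
--     An update is in incorrect order if any of its two pages explicitly break a rule.
--     """
--     return any(
--         (p2, p1) in rules
--         for p1, p2 in combinations(update, 2)
--     )
-- ===== SOURCE B (Python) =====
-- def is_incorrect_order(update, rules):
--     # One pass: first and last index of every page; then check each rule directly.
--     first = {}
--     last = {}
--     for i, p in enumerate(update):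
--         if p not in first:
--             first[p] = i
--         last[p] = i
--     for a, b in rules:
--         if b in first and a in last and first[b] < last[a]:
--             return True
--     return False
-- ===== Notes on version B (the rewrite author's own statement) =====
-- stated objective: faster
-- what changed: Instead of testing every pair of update positions against the rule list, B builds first/last-occurrence index maps of the update in one pass and checks each rule once with two lookups.
import Mathlib
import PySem

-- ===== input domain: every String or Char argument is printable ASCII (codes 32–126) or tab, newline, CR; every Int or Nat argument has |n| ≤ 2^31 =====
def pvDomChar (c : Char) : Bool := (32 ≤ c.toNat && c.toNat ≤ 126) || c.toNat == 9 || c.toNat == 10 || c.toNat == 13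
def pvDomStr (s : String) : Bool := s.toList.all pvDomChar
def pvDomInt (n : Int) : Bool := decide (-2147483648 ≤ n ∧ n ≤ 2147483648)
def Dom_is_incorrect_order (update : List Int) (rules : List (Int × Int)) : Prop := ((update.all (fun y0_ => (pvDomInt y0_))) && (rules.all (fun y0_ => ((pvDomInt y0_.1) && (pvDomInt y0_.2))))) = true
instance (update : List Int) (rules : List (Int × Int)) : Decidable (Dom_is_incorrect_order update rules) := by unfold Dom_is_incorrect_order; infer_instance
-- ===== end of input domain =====

-- B replaces the all-pairs scan of the update by one pass building first/last-occurrence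
-- index maps, then checks each rule with two lookups (objective: faster).


-- ===== PORT A =====
-- combinations(update, 2): all (update[i], update[j]) with i < j, lexicographic order
def pvCombos : List Int → List (Int × Int)
  | [] => []
  | x :: xs => xs.map (fun y => (x, y)) ++ pvCombos xs

def is_incorrect_order (update : List Int) (rules : List (Int × Int)) : Bool :=
  (pvCombos update).any (fun p => rules.contains (p.2, p.1))

-- ===== PORT B =====
-- loop body: if p not in first: first[p] = i;  last[p] = i
def pvStepB (d : PySem.Dict Int Int × PySem.Dict Int Int) (ip : Int × Int) :
    PySem.Dict Int Int × PySem.Dict Int Int :=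
  ((if d.1.contains ip.2 then d.1 else d.1.insert ip.2 ip.1), d.2.insert ip.2 ip.1)

def is_incorrect_order_alt (update : List Int) (rules : List (Int × Int)) : Bool :=
  let fl := (PySem.List.enumerate update).foldl pvStepB (PySem.Dict.empty, PySem.Dict.empty)
  rules.any (fun r =>
    match fl.1.get? r.2, fl.2.get? r.1 with
    | some i, some j => decide (i < j)
    | _, _ => false)

-- ===== PRECONDITION & SPEC =====
def Spec_is_incorrect_order (update : List Int) (rules : List (Int × Int)) (out : Bool) : Prop := out = is_incorrect_order_alt update rules
instance (update : List Int) (rules : List (Int × Int)) (out : Bool) : Decidable (Spec_is_incorrect_order update rules out) := by unfold Spec_is_incorrect_order; infer_instance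

-- ===== CLAIM (what is proved, stated in full; the proofs are below) =====
def Claim_equal_is_incorrect_order : Prop := ∀ (update : List Int) (rules : List (Int × Int)), Dom_is_incorrect_order update rules → Spec_is_incorrect_order update rules (is_incorrect_order update rules)

-- ===== LEMMAS AND PROOFS =====

-- specification of the first-occurrence dict: index (offset by s) of the first occurrence
def pvFirstIdx? : List Int → Int → Int → Option Int
  | [], _, _ => none
  | p :: t, s, x => if p = x then some s else pvFirstIdx? t (s + 1) x

-- specification of the last-occurrence dict
def pvLastIdx? : List Int → Int → Int → Option Int
  | [], _, _ => none
  | p :: t, s, x =>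
    match pvLastIdx? t (s + 1) x with
    | some j => some j
    | none => if p = x then some s else none

def pvStepF (d : PySem.Dict Int Int) (ip : Int × Int) : PySem.Dict Int Int :=
  if d.contains ip.2 then d else d.insert ip.2 ip.1

def pvStepL (d : PySem.Dict Int Int) (ip : Int × Int) : PySem.Dict Int Int :=
  d.insert ip.2 ip.1

theorem foldl_pvStepB (l : List (Int × Int)) (d : PySem.Dict Int Int × PySem.Dict Int Int) :
    l.foldl pvStepB d = (l.foldl pvStepF d.1, l.foldl pvStepL d.2) := by
  induction l generalizing d with
  | nil => rfl
  | cons p t ih => simp [List.foldl_cons, ih, pvStepB, pvStepF, pvStepL]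

theorem foldl_pvStepF (l : List Int) (s : Int) (d : PySem.Dict Int Int) (x : Int) :
    ((PySem.List.enumerate l s).foldl pvStepF d).get? x =
      (match d.get? x with
       | some v => some v
       | none => pvFirstIdx? l s x) := by
  induction l generalizing s d with
  | nil => simp [PySem.List.enumerate, pvFirstIdx?]; cases d.get? x <;> rfl
  | cons p t ih =>
    rw [PySem.List.enumerate_cons, List.foldl_cons, ih]
    by_cases hc : d.contains p
    · have hstep : pvStepF d (s, p) = d := by simp [pvStepF, hc]
      rw [hstep]
      rcases h : d.get? x with _ | v
      · have hne : p ≠ x := by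
          intro he; subst he
          rw [PySem.Dict.contains_eq_isSome_get?] at hc
          simp [h] at hc
        simp [pvFirstIdx?, hne]
      · rfl
    · have hstep : pvStepF d (s, p) = d.insert p s := by simp [pvStepF, hc]
      rw [hstep]
      by_cases hpx : p = x
      · subst hpx
        have hnone : d.get? p = none := by
          rw [PySem.Dict.contains_eq_isSome_get?] at hc
          cases h : d.get? p <;> simp [h] at hc ⊢
        simp [PySem.Dict.get?_insert_self, hnone, pvFirstIdx?]
      · have : (d.insert p s).get? x = d.get? x := by
          rw [PySem.Dict.get?_insert_of_ne]
          exact fun he => hpx he.symm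
        simp [this, pvFirstIdx?, hpx]

theorem foldl_pvStepL (l : List Int) (s : Int) (d : PySem.Dict Int Int) (x : Int) :
    ((PySem.List.enumerate l s).foldl pvStepL d).get? x =
      (match pvLastIdx? l s x with
       | some j => some j
       | none => d.get? x) := by
  induction l generalizing s d with
  | nil => simp [PySem.List.enumerate, pvLastIdx?]
  | cons p t ih =>
    rw [PySem.List.enumerate_cons, List.foldl_cons, ih]
    show (match pvLastIdx? t (s+1) x with
          | some j => some j
          | none => (pvStepL d (s, p)).get? x) = _
    rcases h : pvLastIdx? t (s + 1) x with _ | j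
    · by_cases hpx : p = x
      · subst hpx
        simp [pvStepL, PySem.Dict.get?_insert_self, pvLastIdx?, h]
      · have : (d.insert p s).get? x = d.get? x := by
          rw [PySem.Dict.get?_insert_of_ne]
          exact fun he => hpx he.symm
        simp [pvStepL, this, pvLastIdx?, h, hpx]
    · simp [pvLastIdx?, h]

theorem pvFirstIdx?_spec (l : List Int) (s x v : Int) (h : pvFirstIdx? l s x = some v) :
    ∃ k : Nat, l[k]? = some x ∧ v = s + k := by
  induction l generalizing s with
  | nil => simp [pvFirstIdx?] at h
  | cons p t ih =>
    by_cases hpx : p = x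
    · exact ⟨0, by simp [hpx], by simp [pvFirstIdx?, hpx] at h; omega⟩
    · simp only [pvFirstIdx?, if_neg hpx] at h
      obtain ⟨k, hk, hv⟩ := ih (s + 1) h
      exact ⟨k + 1, by simpa using hk, by push_cast; omega⟩

theorem pvFirstIdx?_le (l : List Int) (s x v : Int) (k : Nat)
    (h : pvFirstIdx? l s x = some v) (hk : l[k]? = some x) : v ≤ s + k := by
  induction l generalizing s k with
  | nil => simp at hk
  | cons p t ih =>
    by_cases hpx : p = x
    · simp [pvFirstIdx?, hpx] at h
      have : (0 : Int) ≤ k := by positivity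
      omega
    · simp only [pvFirstIdx?, if_neg hpx] at h
      cases k with
      | zero => simp at hk; exact absurd hk hpx
      | succ k' =>
        have := ih (s + 1) k' h (by simpa using hk)
        push_cast at this ⊢; omega

theorem pvFirstIdx?_isSome (l : List Int) (s x : Int) (h : x ∈ l) :
    (pvFirstIdx? l s x).isSome := by
  induction l generalizing s with
  | nil => simp at h
  | cons p t ih =>
    by_cases hpx : p = x
    · simp [pvFirstIdx?, hpx]
    · have : x ∈ t := by rcases List.mem_cons.mp h with h' | h' <;> [exact absurd h'.symm hpx; exact h']
      simp only [pvFirstIdx?, if_neg hpx]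
      exact ih (s + 1) this

theorem pvLastIdx?_spec (l : List Int) (s x v : Int) (h : pvLastIdx? l s x = some v) :
    ∃ k : Nat, l[k]? = some x ∧ v = s + k := by
  induction l generalizing s with
  | nil => simp [pvLastIdx?] at h
  | cons p t ih =>
    simp only [pvLastIdx?] at h
    rcases h' : pvLastIdx? t (s + 1) x with _ | j
    · rw [h'] at h
      by_cases hpx : p = x
      · simp [hpx] at h
        exact ⟨0, by simp [hpx], by omega⟩
      · simp [hpx] at h
    · rw [h'] at h
      simp at h; subst h
      obtain ⟨k, hk, hv⟩ := ih (s + 1) h'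
      exact ⟨k + 1, by simpa using hk, by push_cast; omega⟩

theorem pvLastIdx?_isSome (l : List Int) (s x : Int) (h : x ∈ l) :
    (pvLastIdx? l s x).isSome := by
  induction l generalizing s with
  | nil => simp at h
  | cons p t ih =>
    simp only [pvLastIdx?]
    rcases h' : pvLastIdx? t (s + 1) x with _ | j
    · by_cases hpx : p = x
      · simp [hpx]
      · have hx : x ∈ t := by rcases List.mem_cons.mp h with h'' | h'' <;> [exact absurd h''.symm hpx; exact h'']
        have := ih (s + 1) hx
        simp [h'] at this
    · simp

theorem pvLastIdx?_ge (l : List Int) (s x v : Int) (k : Nat)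
    (h : pvLastIdx? l s x = some v) (hk : l[k]? = some x) : s + k ≤ v := by
  induction l generalizing s k with
  | nil => simp at hk
  | cons p t ih =>
    simp only [pvLastIdx?] at h
    cases k with
    | zero =>
      simp at hk; subst hk
      rcases h' : pvLastIdx? t (s + 1) p with _ | j
      · rw [h'] at h
        simp at h
        omega
      · rw [h'] at h; simp at h; subst h
        obtain ⟨k', _, hv⟩ := pvLastIdx?_spec t (s + 1) p j h'
        have : (0 : Int) ≤ k' := by positivity
        omega
    | succ k' =>
      have hkx : t[k']? = some x := by simpa using hk
      rcases h' : pvLastIdx? t (s + 1) x with _ | j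
      · have := pvLastIdx?_isSome t (s + 1) x (List.mem_of_getElem? hkx)
        simp [h'] at this
      · rw [h'] at h; simp at h; subst h
        have := ih (s + 1) k' h' hkx
        push_cast at this ⊢; omega

theorem mem_pvCombos (l : List Int) (u v : Int) :
    (u, v) ∈ pvCombos l ↔ ∃ i j : Nat, i < j ∧ l[i]? = some u ∧ l[j]? = some v := by
  induction l with
  | nil => simp [pvCombos]
  | cons p t ih =>
    simp only [pvCombos, List.mem_append, List.mem_map, ih]
    constructor
    · rintro (⟨y, hy, he⟩ | ⟨i, j, hij, hi, hj⟩)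
      · obtain ⟨he1, he2⟩ := Prod.mk.injEq .. ▸ he
        obtain ⟨k, hk⟩ := List.getElem?_of_mem hy
        exact ⟨0, k + 1, by omega, by simp [he1], by simpa [he2.symm] using hk⟩
      · exact ⟨i + 1, j + 1, by omega, by simpa using hi, by simpa using hj⟩
    · rintro ⟨i, j, hij, hi, hj⟩
      cases i with
      | zero =>
        simp at hi
        cases j with
        | zero => omega
        | succ j' =>
          simp only [List.getElem?_cons_succ] at hj
          exact Or.inl ⟨v, List.mem_of_getElem? hj, by rw [hi]⟩
      | succ i' =>
        cases j with
        | zero => omega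
        | succ j' =>
          exact Or.inr ⟨i', j', by omega, by simpa using hi, by simpa using hj⟩

-- core: B's per-rule check is exactly "some earlier b precedes some later a"
theorem rule_check_iff (update : List Int) (a b : Int) :
    (match pvFirstIdx? update 0 b, pvLastIdx? update 0 a with
     | some i, some j => decide (i < j)
     | _, _ => false) = true ↔
    ∃ i j : Nat, i < j ∧ update[i]? = some b ∧ update[j]? = some a := by
  constructor
  · intro h
    rcases hf : pvFirstIdx? update 0 b with _ | fi <;> rw [hf] at h
    · rcases pvLastIdx? update 0 a <;> simp at h
    · rcases hl : pvLastIdx? update 0 a with _ | la <;> rw [hl] at h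
      · simp at h
      · simp at h
        obtain ⟨i, hi, hfi⟩ := pvFirstIdx?_spec update 0 b fi hf
        obtain ⟨j, hj, hla⟩ := pvLastIdx?_spec update 0 a la hl
        exact ⟨i, j, by omega, hi, hj⟩
  · rintro ⟨i, j, hij, hi, hj⟩
    have hfs := pvFirstIdx?_isSome update 0 b (List.mem_of_getElem? hi)
    have hls := pvLastIdx?_isSome update 0 a (List.mem_of_getElem? hj)
    rcases hf : pvFirstIdx? update 0 b with _ | fi
    · simp [hf] at hfs
    · rcases hl : pvLastIdx? update 0 a with _ | la
      · simp [hl] at hls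
      · have h1 := pvFirstIdx?_le update 0 b fi i hf hi
        have h2 := pvLastIdx?_ge update 0 a la j hl hj
        simp
        omega

theorem main_eq (update : List Int) (rules : List (Int × Int)) :
    is_incorrect_order update rules = is_incorrect_order_alt update rules := by
  rw [Bool.eq_iff_iff]
  unfold is_incorrect_order is_incorrect_order_alt
  have hid : ∀ o : Option Int, (match o with | some j => some j | none => (none : Option Int)) = o := by
    rintro (_ | _) <;> rfl
  simp only [foldl_pvStepB, foldl_pvStepF, foldl_pvStepL, PySem.Dict.get?_empty,
    List.any_eq_true, hid]
  constructor
  · rintro ⟨⟨pb, pa⟩, hp, hr⟩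
    simp only [List.contains_iff_mem] at hr
    refine ⟨(pa, pb), hr, ?_⟩
    rw [rule_check_iff]
    exact (mem_pvCombos update pb pa).mp hp
  · rintro ⟨⟨a, b⟩, hr, hc⟩
    rw [rule_check_iff] at hc
    refine ⟨(b, a), (mem_pvCombos update b a).mpr hc, ?_⟩
    simpa [List.contains_iff_mem] using hr

-- ===== VERDICT (by name: the statement is the Claim_ definition above) =====
theorem is_incorrect_order_spec : Claim_equal_is_incorrect_order := by
  intro update rules _
  exact main_eq update rules
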